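-- pv_equiv track=rewrite | github.com/Thiha3013/uruquai | manzanillo-qc/src/manzanillo_qc/dqi.py | _generate_dicke_states
-- ===== SOURCE A (Python) =====
-- import itertools
--
-- def _generate_dicke_states(m: int, k: int) -> list[str]:
--     """All m-bit strings with exactly k ones (Dicke state computational basis)."""
--     result = []
--     for positions in itertools.combinations(range(m), k):
--         bits = ['0'] * m
--         for p in positions:
--             bits[p] = '1'
--         result.append(''.join(bits))
--     return result
-- ===== SOURCE B (Python) =====
-- def _generate_dicke_states(m: int, k: int) -> list[str]:
--     """All m-bit strings with exactly k ones (Dicke state computational basis)."""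
--     result = []
--     stack = [('', m, k)]
--     while stack:
--         prefix, rem, ones = stack.pop()
--         if ones == 0:
--             result.append(prefix + '0' * rem)
--         elif ones == rem:
--             result.append(prefix + '1' * rem)
--         elif 0 < ones < rem:
--             stack.append((prefix + '0', rem - 1, ones))
--             stack.append((prefix + '1', rem - 1, ones - 1))
--     return result
-- ===== Notes on version B (the rewrite author's own statement) =====
-- stated objective: alternative
-- what changed: Replaces the combinations-of-positions enumeration (build a '0' array, set the chosen positions to '1', join) by an explicit-stack backtracking search that grows each bit string character by character ('1' branch popped first, so the order matches), emitting a forced tail ('0'*rem or '1'*rem) as soon as no choice remains.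
import Mathlib
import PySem

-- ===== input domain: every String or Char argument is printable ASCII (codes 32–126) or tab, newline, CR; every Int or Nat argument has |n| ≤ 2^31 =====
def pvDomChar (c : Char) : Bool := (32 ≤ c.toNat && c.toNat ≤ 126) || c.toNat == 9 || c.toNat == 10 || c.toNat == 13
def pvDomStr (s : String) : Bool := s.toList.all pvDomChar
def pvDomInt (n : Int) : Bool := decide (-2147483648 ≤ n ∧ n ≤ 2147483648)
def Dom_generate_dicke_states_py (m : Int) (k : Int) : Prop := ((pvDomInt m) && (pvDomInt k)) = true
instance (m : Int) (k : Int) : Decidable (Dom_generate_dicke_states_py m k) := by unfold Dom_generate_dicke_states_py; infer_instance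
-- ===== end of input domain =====

-- B builds each bit string recursively ('1' before '0') instead of enumerating position
-- combinations and rewriting a '0' array; an alternative decomposition of the same cost.


-- ===== PORT A =====
-- itertools.combinations(l, j) in its order: prefix with the head, then combinations of the tail.
def pvCombos : List Int → Nat → List (List Int)
  | _, 0 => [[]]
  | [], _+1 => []
  | x :: xs, j+1 => ((pvCombos xs j).map (x :: ·)) ++ pvCombos xs (j+1)

-- Transliteration of A. positions come from range(m), so each p satisfies 0 ≤ p < m and
-- bits[p] = '1' is exactly List.set at p.toNat. k ≥ 0 inside Pre_ (combinations(_, k<0) raises).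
def generate_dicke_states_py (m : Int) (k : Int) : List String :=
  (pvCombos (PySem.List.pyRange 0 m 1) k.toNat).map (fun ps =>
    String.mk (ps.foldl (fun bits p => bits.set p.toNat '1') (List.replicate m.toNat '0')))

-- ===== PORT B =====
-- Transliteration of B's explicit-stack loop; head of the list is the top of the stack,
-- so the '1'-successor (pushed last in Python) comes first. The string prefix is List Char;
-- '0' * rem for a negative rem is the empty string, i.e. List.replicate rem.toNat.
def pvMeasure (stack : List (List Char × Int × Int)) : Nat :=
  (stack.map (fun e => 3 ^ (e.2.1.toNat + 1))).sum

def pvLoop (stack : List (List Char × Int × Int)) (result : List String) : List String :=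
  match stack with
  | [] => result
  | (pfx, rem, ones) :: rest =>
    if ones = 0 then
      pvLoop rest (result ++ [String.mk (pfx ++ List.replicate rem.toNat '0')])
    else if ones = rem then
      pvLoop rest (result ++ [String.mk (pfx ++ List.replicate rem.toNat '1')])
    else if 0 < ones ∧ ones < rem then
      pvLoop ((pfx ++ ['1'], rem - 1, ones - 1) :: (pfx ++ ['0'], rem - 1, ones) :: rest) result
    else
      pvLoop rest result
termination_by pvMeasure stack
decreasing_by
  all_goals
    simp only [pvMeasure, List.map_cons, List.sum_cons]
    have hp : 0 < 3 ^ rem.toNat := Nat.pow_pos (by norm_num)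
    have hq : 0 < 3 ^ (rem.toNat + 1) := Nat.pow_pos (by norm_num)
    have h3p := pow_succ 3 rem.toNat
    try rw [show (rem - 1).toNat + 1 = rem.toNat by omega]
    omega

def generate_dicke_states_py_alt (m : Int) (k : Int) : List String := pvLoop [([], m, k)] []

-- ===== PRECONDITION & SPEC =====
-- A raises ValueError for k < 0 (itertools.combinations rejects a negative r); A is total otherwise.
def Pre_generate_dicke_states_py (m : Int) (k : Int) : Prop := 0 ≤ k
instance (m : Int) (k : Int) : Decidable (Pre_generate_dicke_states_py m k) := by unfold Pre_generate_dicke_states_py; infer_instance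
def pvWitness_generate_dicke_states_py : Int × Int := (4, 2)

def Spec_generate_dicke_states_py (m : Int) (k : Int) (out : List String) : Prop := out = generate_dicke_states_py_alt m k
instance (m : Int) (k : Int) (out : List String) : Decidable (Spec_generate_dicke_states_py m k out) := by unfold Spec_generate_dicke_states_py; infer_instance

-- ===== CLAIM (what is proved, stated in full; the proofs are below) =====
def Claim_equal_generate_dicke_states_py : Prop := ∀ (m : Int) (k : Int), Dom_generate_dicke_states_py m k → Pre_generate_dicke_states_py m k → Spec_generate_dicke_states_py m k (generate_dicke_states_py m k)

-- ===== LEMMAS AND PROOFS =====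

-- proof-side recursive view of B's backtracking (what one stack entry contributes)
def pvRecB (pfx : List Char) (rem : Int) (ones : Int) : List String :=
  if rem ≤ 0 then
    (if ones = 0 then [String.mk pfx] else [])
  else
    (if 0 < ones then pvRecB (pfx ++ ['1']) (rem - 1) (ones - 1) else []) ++
    (if ones ≤ rem - 1 then pvRecB (pfx ++ ['0']) (rem - 1) ones else [])
termination_by rem.toNat
decreasing_by all_goals omega

-- the subtree a single stack entry contributes, with the loop's forced-leaf shortcuts
def pvNode (pfx : List Char) (rem : Int) (ones : Int) : List String :=
  if ones = 0 then [String.mk (pfx ++ List.replicate rem.toNat '0')]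
  else if ones = rem then [String.mk (pfx ++ List.replicate rem.toNat '1')]
  else if 0 < ones ∧ ones < rem then
    pvNode (pfx ++ ['1']) (rem - 1) (ones - 1) ++ pvNode (pfx ++ ['0']) (rem - 1) ones
  else []
termination_by rem.toNat
decreasing_by all_goals omega

lemma pvRecB_zero : ∀ (n : Nat) (rem : Int) (pfx : List Char), rem.toNat = n →
    pvRecB pfx rem 0 = [String.mk (pfx ++ List.replicate rem.toNat '0')] := by
  intro n
  induction n with
  | zero => intro rem pfx h; rw [pvRecB, if_pos (by omega), if_pos rfl]; simp [h]
  | succ n ih =>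
    intro rem pfx h
    rw [pvRecB, if_neg (by omega), if_neg (by omega), if_pos (by omega),
        ih (rem - 1) (pfx ++ ['0']) (by omega)]
    simp [h, show (rem - 1).toNat = n by omega, List.replicate_succ]

lemma pvRecB_full : ∀ (n : Nat) (rem : Int) (pfx : List Char), rem.toNat = n → 0 ≤ rem →
    pvRecB pfx rem rem = [String.mk (pfx ++ List.replicate rem.toNat '1')] := by
  intro n
  induction n with
  | zero => intro rem pfx h h0; rw [pvRecB, if_pos (by omega), if_pos (by omega)]; simp [h]
  | succ n ih =>
    intro rem pfx h h0
    rw [pvRecB, if_neg (by omega), if_pos (by omega), if_neg (by omega),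
        ih (rem - 1) (pfx ++ ['1']) (by omega) (by omega)]
    simp [h, show (rem - 1).toNat = n by omega, List.replicate_succ]

lemma pvRecB_nil : ∀ (n : Nat) (rem ones : Int) (pfx : List Char), rem.toNat = n →
    rem < ones → 0 < ones → pvRecB pfx rem ones = [] := by
  intro n
  induction n with
  | zero => intro rem ones pfx h hlt hpos; rw [pvRecB, if_pos (by omega), if_neg (by omega)]
  | succ n ih =>
    intro rem ones pfx h hlt hpos
    rw [pvRecB, if_neg (by omega), if_pos (by omega), if_neg (by omega),
        ih (rem - 1) (ones - 1) (pfx ++ ['1']) (by omega) (by omega) (by omega)]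
    simp

-- the shortcut subtree equals the plain backtracking subtree whenever ones ≥ 0
lemma pvNode_eq_pvRecB : ∀ (pfx : List Char) (rem ones : Int), 0 ≤ ones →
    pvNode pfx rem ones = pvRecB pfx rem ones := by
  intro pfx rem ones
  induction pfx, rem, ones using pvNode.induct with
  | case1 pfx rem =>
    intro _
    rw [pvNode, if_pos rfl, pvRecB_zero rem.toNat rem pfx rfl]
  | case2 pfx ones h1 =>
    intro h0
    rw [pvNode, if_neg h1, if_pos rfl, pvRecB_full ones.toNat ones pfx rfl h0]
  | case3 pfx rem ones h1 h2 h3 ih1 ih2 =>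
    intro h0
    rw [pvNode, if_neg h1, if_neg h2, if_pos h3, ih1 (by omega), ih2 (by omega)]
    conv_rhs => rw [pvRecB]
    rw [if_neg (by omega), if_pos (by omega), if_pos (by omega)]
  | case4 pfx rem ones h1 h2 h3 =>
    intro h0
    rw [pvNode, if_neg h1, if_neg h2, if_neg h3,
        pvRecB_nil rem.toNat rem ones pfx rfl (by omega) (by omega)]

-- the stack loop accumulates exactly the subtree contributions of its entries, in order
lemma pvLoop_eq : ∀ (stack : List (List Char × Int × Int)) (result : List String),
    pvLoop stack result = result ++ (stack.map (fun e => pvNode e.1 e.2.1 e.2.2)).flatten := by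
  intro stack result
  induction stack, result using pvLoop.induct with
  | case1 result => simp [pvLoop]
  | case2 result pfx rem rest ih =>
    rw [pvLoop, if_pos rfl, ih]
    simp only [List.map_cons, List.flatten_cons]
    rw [pvNode, if_pos rfl]
    simp
  | case3 result pfx ones rest h1 ih =>
    rw [pvLoop, if_neg h1, if_pos rfl, ih]
    simp only [List.map_cons, List.flatten_cons]
    rw [pvNode, if_neg h1, if_pos rfl]
    simp
  | case4 result pfx rem ones rest h1 h2 h3 ih =>
    rw [pvLoop, if_neg h1, if_neg h2, if_pos h3, ih]
    simp only [List.map_cons, List.flatten_cons]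
    conv_rhs => rw [pvNode]
    rw [if_neg h1, if_neg h2, if_pos h3]
    simp
  | case5 result pfx rem ones rest h1 h2 h3 ih =>
    rw [pvLoop, if_neg h1, if_neg h2, if_neg h3, ih]
    simp only [List.map_cons, List.flatten_cons]
    rw [pvNode, if_neg h1, if_neg h2, if_neg h3]
    simp

-- the common core: all n-char bit lists with exactly j ones, '1'-branch first
def pvCore : Nat → Nat → List (List Char)
  | 0, j => if j = 0 then [[]] else []
  | n+1, j => (if 0 < j then (pvCore n (j-1)).map ('1' :: ·) else []) ++
              (if j ≤ n then (pvCore n j).map ('0' :: ·) else [])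

lemma pvCore_zero : ∀ n, pvCore n 0 = [List.replicate n '0'] := by
  intro n; induction n with
  | zero => simp [pvCore]
  | succ n ih => simp [pvCore, ih, List.replicate_succ]

lemma pvCombos_nil_of_lt : ∀ (l : List Int) (j : Nat), l.length < j → pvCombos l j = [] := by
  intro l; induction l with
  | nil => intro j h; cases j with
    | zero => simp at h
    | succ j => rfl
  | cons x xs ih =>
    intro j h; cases j with
    | zero => simp at h
    | succ j =>
      simp [pvCombos]
      constructor
      · exact ih j (by simpa using h)
      · exact ih (j+1) (by simp at h ⊢; omega)

lemma mem_pvCombos : ∀ (l : List Int) (j : Nat) (ps : List Int) (p : Int),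
    ps ∈ pvCombos l j → p ∈ ps → p ∈ l := by
  intro l; induction l with
  | nil =>
    intro j ps p hps hp
    cases j with
    | zero => simp [pvCombos] at hps; subst hps; simp at hp
    | succ j => simp [pvCombos] at hps
  | cons x xs ih =>
    intro j ps p hps hp
    cases j with
    | zero =>
      simp [pvCombos] at hps; subst hps; simp at hp
    | succ j =>
      simp [pvCombos] at hps
      rcases hps with ⟨qs, hqs, rfl⟩ | h
      · simp at hp ⊢
        rcases hp with rfl | hp
        · left; rfl
        · right; exact ih j qs p hqs hp
      · right; exact ih (j+1) ps p h hp

lemma pv_foldl_set_cons (a : Int) :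
    ∀ (ps : List Int) (c : Char) (bits : List Char), (∀ p ∈ ps, a + 1 ≤ p) →
    ps.foldl (fun b p => b.set (p - a).toNat '1') (c :: bits)
      = c :: ps.foldl (fun b p => b.set (p - (a+1)).toNat '1') bits := by
  intro ps; induction ps with
  | nil => intro c bits _; rfl
  | cons p ps ih =>
    intro c bits h
    have hp : a + 1 ≤ p := h p (by simp)
    have hnat : (p - a).toNat = (p - (a+1)).toNat + 1 := by omega
    simp only [List.foldl_cons, hnat, List.set_cons_succ]
    exact ih c _ (fun q hq => h q (by simp [hq]))

-- A's combinations-and-set enumeration computes pvCore, for any starting offset a.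
lemma pvA_core : ∀ (n : Nat) (j : Nat) (a : Int),
    (pvCombos (PySem.List.pyRange a (a + n) 1) j).map
      (fun ps => ps.foldl (fun b p => b.set (p - a).toNat '1') (List.replicate n '0'))
    = pvCore n j := by
  intro n; induction n with
  | zero =>
    intro j a
    rw [show a + (0:Nat) = a by simp, PySem.List.pyRange_one_eq_nil (le_refl a)]
    cases j with
    | zero => simp [pvCombos, pvCore]
    | succ j => simp [pvCombos, pvCore]
  | succ n ih =>
    intro j a
    have hcons : PySem.List.pyRange a (a + (n+1 : Nat)) 1
        = a :: PySem.List.pyRange (a+1) ((a+1) + (n : Nat)) 1 := by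
      rw [PySem.List.pyRange_one_cons (by push_cast; omega)]
      congr 1; push_cast; ring_nf
    rw [hcons]
    cases j with
    | zero =>
      simp only [pvCombos, pvCore, List.map_cons, List.map_nil, List.foldl_nil]
      rw [pvCore_zero]
      simp [List.replicate_succ]
    | succ j =>
      have hmem : ∀ ps ∈ pvCombos (PySem.List.pyRange (a+1) ((a+1) + (n:Nat)) 1) j ∪ pvCombos (PySem.List.pyRange (a+1) ((a+1) + (n:Nat)) 1) (j+1), True := fun _ _ => trivial
      have hlb : ∀ (jj : Nat) (ps : List Int), ps ∈ pvCombos (PySem.List.pyRange (a+1) ((a+1) + (n:Nat)) 1) jj → ∀ p ∈ ps, a + 1 ≤ p := by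
        intro jj ps hps p hp
        have := mem_pvCombos _ jj ps p hps hp
        have := (PySem.List.mem_pyRange_one.mp this).1
        omega
      simp only [pvCombos, List.map_append, List.map_map]
      have h1 : ((pvCombos (PySem.List.pyRange (a+1) ((a+1)+(n:Nat)) 1) j).map
          ((fun ps => ps.foldl (fun b p => b.set (p - a).toNat '1') (List.replicate (n+1) '0')) ∘ (a :: ·)))
          = (pvCore n j).map ('1' :: ·) := by
        rw [← ih j (a+1), List.map_map]
        apply List.map_congr_left
        intro ps hps
        simp only [Function.comp, List.foldl_cons, List.replicate_succ, Int.sub_self,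
          Int.toNat_zero, List.set_cons_zero]
        exact pv_foldl_set_cons a ps '1' _ (hlb j ps hps)
      rw [h1]
      by_cases hle : j + 1 ≤ n
      · have h2 : ((pvCombos (PySem.List.pyRange (a+1) ((a+1)+(n:Nat)) 1) (j+1)).map
            (fun ps => ps.foldl (fun b p => b.set (p - a).toNat '1') (List.replicate (n+1) '0')))
            = (pvCore n (j+1)).map ('0' :: ·) := by
          rw [← ih (j+1) (a+1), List.map_map]
          apply List.map_congr_left
          intro ps hps
          simp only [Function.comp, List.replicate_succ]
          exact pv_foldl_set_cons a ps '0' _ (hlb (j+1) ps hps)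
        rw [h2]
        simp [pvCore, hle]
      · rw [pvCombos_nil_of_lt _ (j+1) (by rw [PySem.List.length_pyRange_one]; omega)]
        simp [pvCore, hle]

-- B's backtracking computes pvCore with the accumulated prefix prepended.
lemma pvB_core : ∀ (n : Nat) (j : Nat) (pfx : List Char),
    pvRecB pfx (n : Int) (j : Int) = (pvCore n j).map (fun cs => String.mk (pfx ++ cs)) := by
  intro n; induction n with
  | zero =>
    intro j pfx
    rw [pvRecB, if_pos (show ((0:Nat):Int) ≤ 0 by norm_num)]
    cases j with
    | zero => simp [pvCore]
    | succ j => rw [if_neg (by push_cast; omega)]; simp [pvCore]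
  | succ n ih =>
    intro j pfx
    rw [pvRecB]
    have hpos : ¬ ((n+1 : Nat) : Int) ≤ 0 := by push_cast; omega
    rw [if_neg hpos]
    have hsub : ((n+1 : Nat) : Int) - 1 = (n : Int) := by push_cast; ring
    cases j with
    | zero =>
      have : ¬ (0 : Int) < 0 := by omega
      rw [if_neg (by simp)]
      rw [if_pos (by rw [hsub]; exact_mod_cast Nat.zero_le n)]
      rw [hsub, ih 0 (pfx ++ ['0'])]
      simp [pvCore, List.map_map, Function.comp_def, List.append_assoc]
    | succ j =>
      rw [if_pos (by exact_mod_cast Nat.succ_pos j)]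
      have hsub2 : ((j+1 : Nat) : Int) - 1 = (j : Int) := by push_cast; ring
      rw [hsub, hsub2, ih j (pfx ++ ['1'])]
      by_cases hle : j + 1 ≤ n
      · rw [if_pos (by exact_mod_cast hle), ih (j+1) (pfx ++ ['0'])]
        simp [pvCore, hle, List.map_map, Function.comp_def, List.append_assoc]
      · rw [if_neg (by push_cast; omega)]
        simp [pvCore, hle, List.map_map, Function.comp_def, List.append_assoc]

-- ===== VERDICT (by name: the statement is the Claim_ definition above) =====
theorem generate_dicke_states_py_spec : Claim_equal_generate_dicke_states_py := by
  intro m k _ hk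
  unfold Spec_generate_dicke_states_py generate_dicke_states_py generate_dicke_states_py_alt
  rw [pvLoop_eq]
  simp only [List.map_cons, List.map_nil, List.flatten_cons, List.flatten_nil,
    List.nil_append, List.append_nil]
  have hk' : (k.toNat : Int) = k := Int.toNat_of_nonneg hk
  rw [pvNode_eq_pvRecB [] m k hk]
  have hB : pvRecB [] m k = (pvCore m.toNat k.toNat).map (fun cs => String.mk cs) := by
    by_cases hm : 0 ≤ m
    · have hm' : ((m.toNat : Nat) : Int) = m := Int.toNat_of_nonneg hm
      have heq : pvRecB [] m k = pvRecB [] ((m.toNat : Nat) : Int) ((k.toNat : Nat) : Int) := by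
        rw [hm', hk']
      rw [heq, pvB_core]
      simp
    · have hm0 : m.toNat = 0 := by omega
      rw [pvRecB, if_pos (by omega), hm0]
      cases hk0 : k.toNat with
      | zero =>
        rw [if_pos (by omega)]
        simp [pvCore]
      | succ j =>
        rw [if_neg (by omega)]
        simp [pvCore]
  rw [hB]
  have hA := pvA_core m.toNat k.toNat 0
  have hrange : PySem.List.pyRange 0 m 1 = PySem.List.pyRange 0 (0 + (m.toNat : Int)) 1 := by
    by_cases hm : 0 ≤ m
    · rw [Int.toNat_of_nonneg hm]; ring_nf
    · rw [PySem.List.pyRange_one_eq_nil (by omega),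
          PySem.List.pyRange_one_eq_nil (by omega)]
  rw [hrange, ← hA, List.map_map]
  apply List.map_congr_left
  intro ps _
  simp [Function.comp]
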